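-- pv_equiv track=rewrite | github.com/dyingjie/gputasker | gpu_info/utils.py | _split_server_status_sections
-- ===== SOURCE A (Python) =====
-- HOSTNAME_MARKER = '__GPUTASKER_HOSTNAME__'
--
-- GPU_MARKER = '__GPUTASKER_GPU__'
--
-- APPS_MARKER = '__GPUTASKER_APPS__'
--
-- USERS_MARKER = '__GPUTASKER_USERS__'
--
-- def _split_server_status_sections(output):
--     sections = {
--         HOSTNAME_MARKER: [],
--         GPU_MARKER: [],
--         APPS_MARKER: [],
--         USERS_MARKER: [],
--     }
--     current_marker = None
--
--     for line in output.splitlines():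
--         if line in sections:
--             current_marker = line
--             continue
--         if current_marker is not None:
--             sections[current_marker].append(line)
--
--     return sections
-- ===== SOURCE B (Python) =====
-- HOSTNAME_MARKER = '__GPUTASKER_HOSTNAME__'
--
-- GPU_MARKER = '__GPUTASKER_GPU__'
--
-- APPS_MARKER = '__GPUTASKER_APPS__'
--
-- USERS_MARKER = '__GPUTASKER_USERS__'
--
-- MARKERS = (HOSTNAME_MARKER, GPU_MARKER, APPS_MARKER, USERS_MARKER)
--
--
-- def _chunks(lines):
--     # parse the line list into (marker, body) chunks: each marker occurrence
--     # with the run of non-marker lines that follows it; a leading run of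
--     # non-marker lines belongs to no chunk
--     out = []
--     i = 0
--     n = len(lines)
--     while i < n:
--         if lines[i] in MARKERS:
--             j = i + 1
--             while j < n and lines[j] not in MARKERS:
--                 j += 1
--             out.append((lines[i], lines[i + 1:j]))
--             i = j
--         else:
--             i += 1
--     return out
--
--
-- def _split_server_status_sections(output):
--     cs = _chunks(output.splitlines())
--     return {m: [line for c in cs if c[0] == m for line in c[1]] for m in MARKERS}
-- ===== Notes on version B (the rewrite author's own statement) =====
-- stated objective: alternative
-- what changed: B is two staged passes with no mutable dict or marker state: it first parses the line list into a list of (marker, body) chunks (each marker with the run of non-marker lines after it), then builds each of the four buckets by concatenating the bodies of that marker's chunks; A is one forward pass mutating a dict under a current_marker variable.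
import Mathlib
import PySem

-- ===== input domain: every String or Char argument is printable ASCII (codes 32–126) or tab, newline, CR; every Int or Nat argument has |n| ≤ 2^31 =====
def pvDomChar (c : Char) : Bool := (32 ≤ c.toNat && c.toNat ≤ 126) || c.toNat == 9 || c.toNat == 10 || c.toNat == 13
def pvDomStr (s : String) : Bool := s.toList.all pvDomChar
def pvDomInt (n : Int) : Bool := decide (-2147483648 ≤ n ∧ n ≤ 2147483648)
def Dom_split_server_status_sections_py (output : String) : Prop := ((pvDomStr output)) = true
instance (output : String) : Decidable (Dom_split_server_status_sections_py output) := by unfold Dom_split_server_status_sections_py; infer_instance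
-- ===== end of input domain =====

-- B replaces A's single forward pass over a mutable dict with a current_marker state by two
-- staged passes: parse the lines into (marker, body) chunks, then concatenate each marker's
-- chunk bodies into its bucket (objective: alternative decomposition, same cost).

-- ===== PORT A =====
def pvInit : PySem.Dict String (List String) :=
  PySem.Dict.ofList
    [("__GPUTASKER_HOSTNAME__", []), ("__GPUTASKER_GPU__", []),
     ("__GPUTASKER_APPS__", []), ("__GPUTASKER_USERS__", [])]

-- one iteration of A's `for line in output.splitlines()` loop over state (sections, current_marker)
def pvStepA (st : PySem.Dict String (List String) × Option String) (line : String) :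
    PySem.Dict String (List String) × Option String :=
  if st.1.contains line then (st.1, some line)
  else
    match st.2 with
    | none => st
    | some m => (st.1.modify m [] (fun xs => xs ++ [line]), st.2)

def split_server_status_sections_py (output : String) : List (String × List String) :=
  ((PySem.Str.splitlines output).foldl pvStepA (pvInit, none)).1.items

-- ===== PORT B =====
-- the MARKERS tuple of Source B
def pvMarkers : List String :=
  ["__GPUTASKER_HOSTNAME__", "__GPUTASKER_GPU__", "__GPUTASKER_APPS__", "__GPUTASKER_USERS__"]

-- Source B's _chunks: the outer while loop is this recursion; the inner while loop that scans
-- to the next marker is the takeWhile (body) / dropWhile (advance i to j) pair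
def pvChunks : List String → List (String × List String)
  | [] => []
  | l :: r =>
      if pvMarkers.contains l then
        (l, r.takeWhile (fun x => !pvMarkers.contains x)) ::
          pvChunks (r.dropWhile (fun x => !pvMarkers.contains x))
      else pvChunks r
termination_by lines => lines.length
decreasing_by
  · have := List.length_dropWhile_le (p := fun x => !pvMarkers.contains x) (l := r)
    simp only [List.length_cons]; omega
  · simp

def split_server_status_sections_py_alt (output : String) : List (String × List String) :=
  let cs := pvChunks (PySem.Str.splitlines output)
  -- the dict comprehension {m: [line for c in cs if c[0] == m for line in c[1]] for m in MARKERS}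
  pvMarkers.map (fun m => (m, cs.flatMap (fun c => if c.1 == m then c.2 else [])))

-- ===== PRECONDITION & SPEC =====
def Spec_split_server_status_sections_py (output : String) (out : List (String × List String)) : Prop := out = split_server_status_sections_py_alt output
instance (output : String) (out : List (String × List String)) : Decidable (Spec_split_server_status_sections_py output out) := by unfold Spec_split_server_status_sections_py; infer_instance

-- ===== CLAIM (what is proved, stated in full; the proofs are below) =====
def Claim_equal_split_server_status_sections_py : Prop := ∀ (output : String), Dom_split_server_status_sections_py output → Spec_split_server_status_sections_py output (split_server_status_sections_py output)

-- ===== LEMMAS AND PROOFS =====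

-- "line is one of the four markers"
def pvP (l : String) : Bool := decide (l ∈ pvMarkers)

-- lines contributed to bucket m by A's loop started in state current_marker = cur
def pvSegA (cur : Option String) (lines : List String) (m : String) : List String :=
  match lines with
  | [] => []
  | l :: r =>
      if pvP l then pvSegA (some l) r m
      else
        match cur with
        | none => pvSegA none r m
        | some c => (if c = m then [l] else []) ++ pvSegA (some c) r m

-- lines contributed to bucket m, read off the line list directly
def pvSegB (lines : List String) (m : String) : List String :=
  match lines with
  | [] => []
  | l :: r =>
      if pvP l then (if l = m then r.takeWhile (fun x => !pvP x) else []) ++ pvSegB r m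
      else pvSegB r m

lemma pvInit_getD (k : String) : pvInit.getD k [] = [] := by
  have h : pvInit = PySem.Dict.mk
      [("__GPUTASKER_HOSTNAME__", []), ("__GPUTASKER_GPU__", []),
       ("__GPUTASKER_APPS__", []), ("__GPUTASKER_USERS__", [])] := by decide
  rw [h, PySem.Dict.getD_eq_get?_getD]
  simp [PySem.Dict.get?_mk_cons]
  split_ifs <;> rfl

lemma pvInit_keys : pvInit.keys = pvMarkers := by decide

lemma pvContains_of_keys {d : PySem.Dict String (List String)} (h : d.keys = pvMarkers)
    (x : String) : d.contains x = pvP x := by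
  rw [PySem.Dict.contains_eq_decide_mem_keys, h]; rfl

lemma pvKeys_modify {d : PySem.Dict String (List String)} (h : d.keys = pvMarkers)
    {c : String} (hc : pvP c = true) (f : List String → List String) :
    (d.modify c [] f).keys = pvMarkers := by
  rw [PySem.Dict.keys_modify, PySem.Dict.keys_insert_of_contains, h]
  rw [pvContains_of_keys h]; exact hc

lemma pvSegA_some (m : String) (lines : List String) : ∀ (c : String),
    pvSegA (some c) lines m
      = (if c = m then lines.takeWhile (fun x => !pvP x) else []) ++ pvSegB lines m := by
  induction lines with
  | nil => intro c; simp [pvSegA, pvSegB]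
  | cons l r ih =>
      intro c
      by_cases hl : pvP l = true
      · simp [pvSegA, pvSegB, hl, ih l]
      · simp only [pvSegA, pvSegB, hl, Bool.false_eq_true, if_false, ih c,
          List.takeWhile_cons, Bool.not_eq_eq_eq_not, Bool.not_true]
        by_cases hcm : c = m <;> simp [hcm, Bool.not_eq_true] at hl ⊢

lemma pvSegA_none (lines : List String) (m : String) :
    pvSegA none lines m = pvSegB lines m := by
  induction lines with
  | nil => rfl
  | cons l r ih =>
      by_cases hl : pvP l = true
      · simp [pvSegA, pvSegB, hl, pvSegA_some]
      · simp [pvSegA, pvSegB, hl, ih]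

-- characterization of A's foldl: keys unchanged, each bucket extended by pvSegA
lemma pvFoldA (lines : List String) : ∀ (d : PySem.Dict String (List String)) (cur : Option String),
    d.keys = pvMarkers → (∀ c, cur = some c → pvP c = true) →
    (lines.foldl pvStepA (d, cur)).1.keys = pvMarkers ∧
    ∀ m, (lines.foldl pvStepA (d, cur)).1.getD m [] = d.getD m [] ++ pvSegA cur lines m := by
  induction lines with
  | nil => intro d cur hk _; exact ⟨hk, fun m => by simp [pvSegA]⟩
  | cons l r ih =>
      intro d cur hk hcur
      simp only [List.foldl_cons]
      by_cases hl : pvP l = true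
      · have hstep : pvStepA (d, cur) l = (d, some l) := by
          simp [pvStepA, pvContains_of_keys hk, hl]
        rw [hstep]
        obtain ⟨h1, h2⟩ := ih d (some l) hk (fun c hc => by cases hc; exact hl)
        exact ⟨h1, fun m => by rw [h2 m]; simp [pvSegA, hl]⟩
      · cases cur with
        | none =>
            have hstep : pvStepA (d, none) l = (d, none) := by
              simp [pvStepA, pvContains_of_keys hk, hl]
            rw [hstep]
            obtain ⟨h1, h2⟩ := ih d none hk (by simp)
            exact ⟨h1, fun m => by rw [h2 m]; simp [pvSegA, hl]⟩
        | some c =>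
            have hc : pvP c = true := hcur c rfl
            have hstep : pvStepA (d, some c) l
                = (d.modify c [] (fun xs => xs ++ [l]), some c) := by
              simp [pvStepA, pvContains_of_keys hk, hl]
            rw [hstep]
            obtain ⟨h1, h2⟩ := ih (d.modify c [] (fun xs => xs ++ [l])) (some c)
              (pvKeys_modify hk hc _) (fun c' hc' => by cases hc'; exact hc)
            refine ⟨h1, fun m => ?_⟩
            rw [h2 m, PySem.Dict.getD_modify]
            by_cases hcm : c = m
            · subst hcm; simp [pvSegA, hl, List.append_assoc]
            · simp [pvSegA, hl, hcm, Ne.symm hcm]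

-- the two spellings of "is not a marker" used by the ports and the seg functions
lemma pvPredEq : (fun x => !pvMarkers.contains x) = (fun x => !pvP x) := by
  funext x; simp [pvP]

-- pvSegB ignores a leading run of non-marker lines
lemma pvSegB_dropWhile (r : List String) (m : String) :
    pvSegB (r.dropWhile (fun x => !pvP x)) m = pvSegB r m := by
  induction r with
  | nil => rfl
  | cons l r ih =>
      by_cases hl : pvP l = true
      · simp [hl]
      · have h1 : (!pvP l) = true := by simp at hl ⊢; exact hl
        simp only [List.dropWhile_cons, h1, if_true, ih]
        simp [pvSegB, hl]

-- characterization of B's bucket: the bodies of m's chunks concatenate to pvSegB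
lemma pvBucket_chunks (m : String) (lines : List String) :
    (pvChunks lines).flatMap (fun c => if c.1 == m then c.2 else []) = pvSegB lines m := by
  induction lines using pvChunks.induct with
  | case1 => simp [pvChunks, pvSegB]
  | case2 l r hl ih =>
      have hlP : pvP l = true := by simpa [pvP] using hl
      rw [pvChunks, if_pos hl]
      simp only [pvPredEq] at ih ⊢
      simp only [List.flatMap_cons, ih, pvSegB_dropWhile]
      simp [pvSegB, hlP, beq_iff_eq]
  | case3 l r hl ih =>
      have hlP : pvP l = false := by simpa [pvP] using hl
      rw [pvChunks, if_neg hl]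
      rw [ih]
      simp [pvSegB, hlP]

-- ===== VERDICT (by name: the statement is the Claim_ definition above) =====
theorem split_server_status_sections_py_spec : Claim_equal_split_server_status_sections_py := by
  intro output _
  unfold Spec_split_server_status_sections_py
  unfold split_server_status_sections_py split_server_status_sections_py_alt
  obtain ⟨ha1, ha2⟩ := pvFoldA (PySem.Str.splitlines output) pvInit none pvInit_keys (by simp)
  rw [PySem.Dict.items_eq_map_keys _ (by rw [ha1]; decide) ([] : List String), ha1]
  refine List.map_congr_left (fun k _ => ?_)
  rw [ha2 k, pvInit_getD, pvSegA_none, pvBucket_chunks]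
  simp
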